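-- pv_equiv track=rewrite | github.com/Klaudia1303/student_code_analysis | Progetto-tirocinio2024/data/student_data/2068282_Baldo/LabPython07/A_Ex1.py | A_Ex1
-- ===== SOURCE A (Python) =====
-- def A_Ex1(L1, L2):
--     L3 = []
--     for i in range(len(L2)):
--         if i > len(L1) - 1:
--             L3.append(L2[i])
--         else:
--             L3.append(L1[i] + L2[i])
--     return L3
-- ===== SOURCE B (Python) =====
-- def A_Ex1(L1, L2):
--     # Structural recursion on the two lists: no indexing, no length test per element.
--     if not L2:
--         return []
--     if not L1:
--         return list(L2)
--     return [L1[0] + L2[0]] + A_Ex1(L1[1:], L2[1:])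
-- ===== Notes on version B (the rewrite author's own statement) =====
-- stated objective: alternative
-- what changed: Replaces A's index loop over range(len(L2)) with a per-element length-comparison branch by structural recursion on the two lists (base cases empty L2 / empty L1, recursive case summing the heads), removing all indexing and length arithmetic.
import Mathlib
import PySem

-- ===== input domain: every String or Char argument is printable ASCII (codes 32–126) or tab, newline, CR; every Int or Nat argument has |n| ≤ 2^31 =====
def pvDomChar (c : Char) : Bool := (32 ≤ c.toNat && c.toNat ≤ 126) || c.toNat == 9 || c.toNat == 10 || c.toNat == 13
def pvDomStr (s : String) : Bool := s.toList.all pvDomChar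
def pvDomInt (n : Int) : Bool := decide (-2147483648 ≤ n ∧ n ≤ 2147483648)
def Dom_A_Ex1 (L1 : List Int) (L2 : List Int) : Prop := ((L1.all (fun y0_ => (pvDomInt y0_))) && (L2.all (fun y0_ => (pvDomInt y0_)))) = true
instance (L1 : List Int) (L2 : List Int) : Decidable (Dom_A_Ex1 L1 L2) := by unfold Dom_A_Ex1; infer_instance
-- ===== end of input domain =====

-- B replaces A's index loop (with its per-element length-comparison branch) by structural recursion on the two lists (objective: alternative, same cost).


-- ===== PORT A =====
-- A's loop over range(len(L2)) with an in-loop branch; indexes are always in range, so pyGetD's default is never taken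
def A_Ex1 (L1 : List Int) (L2 : List Int) : List Int :=
  (PySem.List.pyRange 0 L2.length 1).foldl (fun L3 i =>
    if i > (L1.length : Int) - 1 then
      L3 ++ [PySem.List.pyGetD L2 i 0]
    else
      L3 ++ [PySem.List.pyGetD L1 i 0 + PySem.List.pyGetD L2 i 0]) []

-- ===== PORT B =====
-- B: structural recursion on both lists; head sum cons'ed via [h1+h2] ++ recursive call, as in Source B
def A_Ex1_alt : List Int → List Int → List Int
  | _, [] => []
  | [], L2 => L2
  | h1 :: t1, h2 :: t2 => [h1 + h2] ++ A_Ex1_alt t1 t2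

-- ===== PRECONDITION & SPEC =====
def Spec_A_Ex1 (L1 : List Int) (L2 : List Int) (out : List Int) : Prop := out = A_Ex1_alt L1 L2
instance (L1 : List Int) (L2 : List Int) (out : List Int) : Decidable (Spec_A_Ex1 L1 L2 out) := by unfold Spec_A_Ex1; infer_instance

-- ===== CLAIM (what is proved, stated in full; the proofs are below) =====
def Claim_equal_A_Ex1 : Prop := ∀ (L1 : List Int) (L2 : List Int), Dom_A_Ex1 L1 L2 → Spec_A_Ex1 L1 L2 (A_Ex1 L1 L2)

-- ===== LEMMAS AND PROOFS =====
-- A's fold equals the zip-sum prefix followed by L2's tail beyond len(L1)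
theorem A_Ex1_eq_zip_drop (L1 L2 : List Int) :
    A_Ex1 L1 L2 = (List.zipWith (· + ·) L1 L2) ++ L2.drop L1.length := by
  unfold A_Ex1
  have hfun : (fun (L3 : List Int) (i : Int) =>
      if i > (L1.length : Int) - 1 then L3 ++ [PySem.List.pyGetD L2 i 0]
      else L3 ++ [PySem.List.pyGetD L1 i 0 + PySem.List.pyGetD L2 i 0]) =
      (fun (L3 : List Int) (i : Int) => L3 ++ [if i > (L1.length : Int) - 1
        then PySem.List.pyGetD L2 i 0
        else PySem.List.pyGetD L1 i 0 + PySem.List.pyGetD L2 i 0]) := by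
    funext L3 i; split_ifs <;> rfl
  rw [hfun, PySem.List.foldl_append_singleton_eq_map, PySem.List.pyRange_zero_nat]
  simp only [List.nil_append, List.map_map]
  apply List.ext_getElem
  · simp; omega
  · intro i hi h2
    simp only [List.length_map, List.length_range] at hi
    simp only [List.getElem_map, List.getElem_range, Function.comp_apply,
      PySem.List.pyGetD_natCast]
    by_cases h : i < L1.length
    · rw [if_neg (by omega), List.getElem_append_left (by simp; omega),
        List.getElem_zipWith, List.getD_eq_getElem _ _ h, List.getD_eq_getElem _ _ hi]
    · rw [if_pos (by omega), List.getElem_append_right (by simp; omega)]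
      simp only [List.length_zipWith, List.getElem_drop]
      rw [List.getD_eq_getElem _ _ hi]
      congr 1
      omega

-- B's recursion computes the same zip-sum prefix plus dropped tail
theorem alt_eq_zip_drop : ∀ (L1 L2 : List Int),
    A_Ex1_alt L1 L2 = (List.zipWith (· + ·) L1 L2) ++ L2.drop L1.length := by
  intro L1
  induction L1 with
  | nil => intro L2; cases L2 <;> rfl
  | cons h1 t1 ih =>
    intro L2
    cases L2 with
    | nil => rfl
    | cons h2 t2 => simp [A_Ex1_alt, ih t2]

-- ===== VERDICT (by name: the statement is the Claim_ definition above) =====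
theorem A_Ex1_spec : Claim_equal_A_Ex1 := by
  intro L1 L2 _
  unfold Spec_A_Ex1
  rw [A_Ex1_eq_zip_drop, alt_eq_zip_drop]
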